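-- pv_equiv track=rewrite | github.com/AlifSrSE/ProblemSolves | 1437D-minimalHeightTree.py | solve
-- ===== SOURCE A (Python) =====
-- def solve(a):
--     if len(a) <= 1: return 0
--     result = 1
--     parent_num = 1
--     next_parent_num = 1
--     parent_index = 0
--     for i in range(2, len(a)):
--         if a[i] > a[i - 1]:
--             next_parent_num += 1
--         elif parent_index != parent_num - 1:
--             next_parent_num += 1
--             parent_index += 1
--         else:
--             parent_num = next_parent_num
--             next_parent_num = 1
--             parent_index = 0
--             result += 1
--     return result
-- ===== SOURCE B (Python) =====
-- def solve(a):
--     n = len(a)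
--     if n <= 1:
--         return 0
--     # phase 1: run-length-encode the child sequence a[1:] into maximal
--     # strictly increasing runs
--     runs = []
--     cur = 1
--     for i in range(2, n):
--         if a[i] > a[i - 1]:
--             cur += 1
--         else:
--             runs.append(cur)
--             cur = 1
--     runs.append(cur)
--     # phase 2: consume runs level by level (each parent takes one run)
--     height = 1
--     parents = runs[0]
--     idx = 1
--     while idx < len(runs):
--         taken = runs[idx:idx + parents]
--         parents = sum(taken)
--         idx += len(taken)
--         height += 1
--     return height
-- ===== Notes on version B (the rewrite author's own statement) =====
-- stated objective: alternative
-- what changed: A's single flat scan carrying four coupled counters (result, parent_num, next_parent_num, parent_index) is replaced by a two-phase algorithm: first run-length-encode the child sequence into maximal strictly increasing runs, then consume whole runs level by level (each level takes up to `parents` runs and sums their sizes).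
import Mathlib
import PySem

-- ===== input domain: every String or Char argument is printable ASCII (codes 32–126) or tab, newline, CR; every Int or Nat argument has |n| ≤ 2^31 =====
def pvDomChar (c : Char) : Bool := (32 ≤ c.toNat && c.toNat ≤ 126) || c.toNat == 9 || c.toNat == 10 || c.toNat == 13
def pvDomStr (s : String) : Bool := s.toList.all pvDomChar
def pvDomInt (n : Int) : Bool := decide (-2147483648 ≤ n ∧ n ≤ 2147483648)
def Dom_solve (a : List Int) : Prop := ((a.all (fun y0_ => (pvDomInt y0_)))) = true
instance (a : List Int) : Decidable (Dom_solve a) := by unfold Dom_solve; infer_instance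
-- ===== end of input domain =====

-- B re-implements A in two phases (run-length encoding then a level-by-level consumption loop)
-- instead of A's single flat scan with four state variables; same O(n) cost, objective: alternative.

-- ===== PORT A =====
-- A's for-loop over i = 2 .. len(a)-1 compares a[i] with a[i-1]; ported as the obvious
-- recursion over the tail carrying prev = a[i-1] and A's four state variables unchanged.
def goA : Int → Int → Int → Int → Int → List Int → Int
  | _, res, _, _, _, [] => res
  | prev, res, pn, npn, pidx, x :: xs =>
    if x > prev then goA x res pn (npn + 1) pidx xs
    else if pidx ≠ pn - 1 then goA x res pn (npn + 1) (pidx + 1) xs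
    else goA x (res + 1) npn 1 0 xs

def solve (a : List Int) : Int :=
  match a with
  | [] => 0
  | [_] => 0
  | _ :: x1 :: rest => goA x1 1 1 1 0 rest

-- ===== PORT B =====
-- phase 1 of Source B: run lengths of the maximal strictly increasing runs of prev :: xs,
-- cur being the length accumulated so far for the current run.
def runsAux : Int → List Int → Nat → List Nat
  | _, [], cur => [cur]
  | prev, x :: xs, cur =>
    if x > prev then runsAux x xs (cur + 1)
    else cur :: runsAux x xs 1

-- phase 2 of Source B: the while loop consuming up to `parents` runs per level.
-- `max p 1` is only a totality guard: at every call site p ≥ 1 (run lengths are positive),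
-- where it equals p, exactly as in Source B.
def levelsL (p : Nat) (rs : List Nat) : Nat :=
  if h : rs = [] then 0
  else 1 + levelsL ((rs.take (max p 1)).sum) (rs.drop (max p 1))
termination_by rs.length
decreasing_by
  cases rs with
  | nil => exact absurd rfl h
  | cons r t =>
    have h1 : 1 ≤ max p 1 := le_max_right p 1
    simp only [List.length_drop, List.length_cons]
    omega

def solve_alt (a : List Int) : Int :=
  match a with
  | [] => 0
  | [_] => 0
  | _ :: x1 :: rest =>
    match runsAux x1 rest 1 with
    | [] => 0  -- unreachable: runsAux never returns []
    | r0 :: rt => Int.ofNat (1 + levelsL r0 rt)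

-- ===== PRECONDITION & SPEC =====
def Spec_solve (a : List Int) (out : Int) : Prop := out = solve_alt a
instance (a : List Int) (out : Int) : Decidable (Spec_solve a out) := by unfold Spec_solve; infer_instance

-- ===== CLAIM (what is proved, stated in full; the proofs are below) =====
def Claim_equal_solve : Prop := ∀ (a : List Int), Dom_solve a → Spec_solve a (solve a)

-- ===== LEMMAS AND PROOFS =====

-- abstraction of A's loop over whole runs: cap = parents still available in the current
-- level after the current one, s = nodes placed at the current depth so far (current run's
-- remaining length is the list head).
def G : Nat → Nat → List Nat → Nat
  | _, _, [] => 0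
  | _, _, [_] => 0
  | cap, s, r :: r2 :: t =>
    if cap ≠ 0 then G (cap - 1) (s + r) (r2 :: t)
    else 1 + G (s + r - 2) 1 (r2 :: t)

lemma runsAux_ne_nil (xs : List Int) (p : Int) (c : Nat) : runsAux p xs c ≠ [] := by
  induction xs generalizing p c with
  | nil => simp [runsAux]
  | cons x xs ih =>
    simp only [runsAux]
    split
    · exact ih _ _
    · simp

lemma runsAux_pos (xs : List Int) (p : Int) (c : Nat) (hc : 1 ≤ c) :
    ∀ y ∈ runsAux p xs c, 1 ≤ y := by
  induction xs generalizing p c with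
  | nil => intro y hy; simp [runsAux] at hy; omega
  | cons x xs ih =>
    intro y hy
    simp only [runsAux] at hy
    split at hy
    · exact ih _ _ (by omega) y hy
    · rcases List.mem_cons.1 hy with h | h
      · omega
      · exact ih _ _ (by omega) y h

lemma runsAux_succ (xs : List Int) (p : Int) (c : Nat) :
    ∃ h t, runsAux p xs c = h :: t ∧ runsAux p xs (c + 1) = (h + 1) :: t := by
  induction xs generalizing p c with
  | nil => exact ⟨c, [], rfl, rfl⟩
  | cons x xs ih =>
    by_cases hx : x > p
    · obtain ⟨h, t, h1, h2⟩ := ih x (c + 1)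
      exact ⟨h, t, by simp [runsAux, hx]; exact h1, by simp [runsAux, hx]; exact h2⟩
    · exact ⟨c, runsAux x xs 1, by simp [runsAux, hx], by simp [runsAux, hx]⟩

lemma G_shift (cap s r : Nat) (t : List Nat) :
    G cap (s + 1) (r :: t) = G cap s ((r + 1) :: t) := by
  cases t with
  | nil => rfl
  | cons r2 t2 =>
    simp only [G]
    have h : s + 1 + r = s + (r + 1) := by omega
    rw [h]

-- A's loop equals G on the run decomposition of the unread input.
lemma goA_eq_G (xs : List Int) : ∀ (prev res pn npn pidx : Int),
    1 ≤ npn → 1 ≤ pn → 0 ≤ pidx → pidx ≤ pn - 1 →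
    goA prev res pn npn pidx xs
      = res + (G ((pn - 1 - pidx).toNat) npn.toNat (runsAux prev xs 1) : Int) := by
  induction xs with
  | nil =>
    intro prev res pn npn pidx _ _ _ _
    simp [goA, runsAux, G]
  | cons x xs ih =>
    intro prev res pn npn pidx hnpn hpn hpidx hle
    by_cases hx : x > prev
    · -- continue the current run
      rw [show goA prev res pn npn pidx (x :: xs) = goA x res pn (npn + 1) pidx xs from by
        simp [goA, hx]]
      rw [ih x res pn (npn + 1) pidx (by omega) hpn hpidx hle]
      obtain ⟨h, t, h1, h2⟩ := runsAux_succ xs x 1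
      rw [show runsAux prev (x :: xs) 1 = runsAux x xs 2 from by simp [runsAux, hx]]
      rw [h1, h2, show (npn + 1).toNat = npn.toNat + 1 from by omega, G_shift]
    · obtain ⟨r2, t2, h1⟩ : ∃ r2 t2, runsAux x xs 1 = r2 :: t2 := by
        cases hr : runsAux x xs 1 with
        | nil => exact absurd hr (runsAux_ne_nil xs x 1)
        | cons a b => exact ⟨a, b, rfl⟩
      have hrw : runsAux prev (x :: xs) 1 = 1 :: r2 :: t2 := by simp [runsAux, hx, h1]
      by_cases hp : pidx ≠ pn - 1
      · -- new run, same level: next parent takes it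
        rw [show goA prev res pn npn pidx (x :: xs) = goA x res pn (npn + 1) (pidx + 1) xs
          from by simp [goA, hx, hp]]
        rw [ih x res pn (npn + 1) (pidx + 1) (by omega) hpn (by omega) (by omega)]
        rw [hrw, h1]
        simp only [G]
        rw [if_pos (show (pn - 1 - pidx).toNat ≠ 0 from by omega)]
        have e1 : (pn - 1 - (pidx + 1)).toNat = (pn - 1 - pidx).toNat - 1 := by omega
        have e2 : (npn + 1).toNat = npn.toNat + 1 := by omega
        rw [e1, e2]
      · -- parents exhausted: new level
        rw [not_not] at hp
        rw [show goA prev res pn npn pidx (x :: xs) = goA x (res + 1) npn 1 0 xs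
          from by simp [goA, hx, hp]]
        rw [ih x (res + 1) npn 1 0 (by omega) hnpn (by omega) (by omega)]
        rw [hrw, h1]
        simp only [G]
        rw [if_neg (show ¬ (pn - 1 - pidx).toNat ≠ 0 from by omega)]
        have e1 : (npn - 1 - 0).toNat = npn.toNat + 1 - 2 := by omega
        have e2 : (1 : Int).toNat = 1 := rfl
        rw [e1, e2]
        push_cast
        ring

-- G equals B's level loop.
lemma G_eq_levels (t : List Nat) : ∀ (cap s r : Nat), 1 ≤ s → 1 ≤ r →
    (∀ y ∈ t, 1 ≤ y) →
    G cap s (r :: t) = levelsL (s + r - 1 + (t.take cap).sum) (t.drop cap) := by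
  induction t with
  | nil =>
    intro cap s r _ _ _
    simp [G, levelsL]
  | cons r2 t2 ih =>
    intro cap s r hs hr hpos
    have hr2 : 1 ≤ r2 := hpos r2 (by simp)
    have hpos2 : ∀ y ∈ t2, 1 ≤ y := fun y hy => hpos y (by simp [hy])
    cases cap with
    | zero =>
      -- current level ends here
      rw [show G 0 s (r :: r2 :: t2) = 1 + G (s + r - 2) 1 (r2 :: t2) from by simp [G]]
      rw [ih (s + r - 2) 1 r2 (by omega) hr2 hpos2]
      simp only [List.take_zero, List.drop_zero, List.sum_nil]
      rw [show levelsL (s + r - 1 + 0) (r2 :: t2)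
            = 1 + levelsL (((r2 :: t2).take (max (s + r - 1 + 0) 1)).sum)
                ((r2 :: t2).drop (max (s + r - 1 + 0) 1)) from by
        rw [levelsL]; simp]
      have hm : max (s + r - 1 + 0) 1 = (s + r - 2) + 1 := by omega
      rw [hm]
      simp only [List.take_succ_cons, List.drop_succ_cons, List.sum_cons]
      congr 2
      omega
    | succ c =>
      rw [show G (c + 1) s (r :: r2 :: t2) = G c (s + r) (r2 :: t2) from by simp [G]]
      rw [ih c (s + r) r2 (by omega) hr2 hpos2]
      simp only [List.take_succ_cons, List.drop_succ_cons, List.sum_cons]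
      congr 1
      omega

-- ===== VERDICT (by name: the statement is the Claim_ definition above) =====
theorem solve_spec : Claim_equal_solve := by
  intro a _
  unfold Spec_solve
  match a with
  | [] => rfl
  | [_] => rfl
  | x0 :: x1 :: rest =>
    obtain ⟨r0, rt, hr⟩ : ∃ r0 rt, runsAux x1 rest 1 = r0 :: rt := by
      cases hr : runsAux x1 rest 1 with
      | nil => exact absurd hr (runsAux_ne_nil rest x1 1)
      | cons a b => exact ⟨a, b, rfl⟩
    have hr0 : 1 ≤ r0 := runsAux_pos rest x1 1 (by omega) r0 (by simp [hr])
    have hrt : ∀ y ∈ rt, 1 ≤ y := fun y hy =>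
      runsAux_pos rest x1 1 (by omega) y (by simp [hr, hy])
    show goA x1 1 1 1 0 rest = solve_alt (x0 :: x1 :: rest)
    rw [goA_eq_G rest x1 1 1 1 0 (by omega) (by omega) (by omega) (by omega)]
    rw [hr]
    rw [show ((1 : Int) - 1 - 0).toNat = 0 from rfl, show Int.toNat 1 = 1 from rfl]
    rw [G_eq_levels rt 0 1 r0 (by omega) hr0 hrt]
    simp only [List.take_zero, List.drop_zero, List.sum_nil]
    simp only [solve_alt, hr]
    simp only [Nat.add_zero, Nat.add_sub_cancel_left, Int.ofNat_eq_natCast]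
    push_cast
    ring
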